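-- pv_equiv track=rewrite | github.com/minghong/stLFR_binner | python_code/contig_barcode_read.py | get_head_cigar
-- ===== SOURCE A (Python) =====
-- def get_head_cigar(cigar_str):
--     cigar_list = ["M","I","D","N","S","H","P", "=", "X"]
--     cigar_str_len = len(cigar_str)
--     tmp_cigar_c= ""
--     tmp_num = 0
--     new_cigar_str = ""
--     for i in range(cigar_str_len):
--         if cigar_str[i] in cigar_list:
--             tmp_cigar_c = cigar_str[i]
--             tmp_num = int(cigar_str[0:i])
--             if i+1 < cigar_str_len:
--                 new_cigar_str = cigar_str[i+1:]
--             else: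
--                 new_cigar_str = ""
--             break
--
--     return (tmp_cigar_c, tmp_num, new_cigar_str)
-- ===== SOURCE B (Python) =====
-- def get_head_cigar(cigar_str):
--     ops = ["M", "I", "D", "N", "S", "H", "P", "=", "X"]
--     positions = [p for p in (cigar_str.find(c) for c in ops) if p >= 0]
--     if not positions:
--         return ("", 0, "")
--     i = min(positions)
--     return (cigar_str[i], int(cigar_str[:i]), cigar_str[i + 1:])
-- ===== Notes on version B (the rewrite author's own statement) =====
-- stated objective: faster
-- what changed: A scans the string left-to-right in Python testing each character for membership in the op list and breaks at the first hit; B instead runs str.find once per op character, keeps the non-negative positions and takes their minimum as the index of the first op char.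
-- outside the precondition, e.g. on get_head_cigar('M5S'): A raises ValueError, B raises ValueError; on get_head_cigar('x3M'): A raises ValueError, B raises ValueError
import Mathlib
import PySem

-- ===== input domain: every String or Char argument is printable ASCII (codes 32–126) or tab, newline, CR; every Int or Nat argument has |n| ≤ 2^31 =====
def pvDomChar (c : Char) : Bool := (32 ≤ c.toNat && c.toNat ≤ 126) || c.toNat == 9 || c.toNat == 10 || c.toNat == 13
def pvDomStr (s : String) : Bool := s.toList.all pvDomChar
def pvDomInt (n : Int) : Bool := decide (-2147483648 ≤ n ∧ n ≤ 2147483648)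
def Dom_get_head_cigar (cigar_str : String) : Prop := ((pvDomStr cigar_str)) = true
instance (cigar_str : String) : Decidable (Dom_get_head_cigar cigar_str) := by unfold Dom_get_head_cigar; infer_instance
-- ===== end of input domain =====

-- B replaces A's per-character left-to-right scan for the first CIGAR-op character by nine
-- substring searches (str.find per op char) plus a minimum over the hit positions; the timing
-- run measured B faster by a constant factor (C-level find vs an interpreted loop).

-- the nine CIGAR operation characters (Python's cigar_list, shared by both ports and Pre_)
def cigarOps : List Char := ['M', 'I', 'D', 'N', 'S', 'H', 'P', '=', 'X']

-- ===== PORT A =====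
-- A's for-loop with break: recursion over the remaining suffix, i the current index into cs
def getHeadCigarLoopA (cs : List Char) (i : Nat) : List Char → String × Int × String
  | [] => ("", 0, "")
  | c :: rest =>
    if cigarOps.contains c then
      (String.ofList [c],
       (PySem.Int.ofChars? (PySem.List.slice cs (some 0) (some (i : Int)))).getD 0,  -- int(cigar_str[0:i]); Pre_ excludes the ValueError (none) case
       if i + 1 < cs.length then String.ofList (PySem.List.slice cs (some ((i : Int) + 1)) none) else "")
    else getHeadCigarLoopA cs (i + 1) rest

def get_head_cigar (cigar_str : String) : String × Int × String :=
  getHeadCigarLoopA cigar_str.toList 0 cigar_str.toList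

-- ===== PORT B =====
def get_head_cigar_alt (cigar_str : String) : String × Int × String :=
  let cs := cigar_str.toList
  let positions := (cigarOps.map (fun c => PySem.Chars.find cs [c])).filter (fun p => decide (0 ≤ p))
  match PySem.List.min? positions (fun p => p) with
  | none => ("", 0, "")
  | some i =>
    match PySem.List.pyGet? cs i with
    | none => ("", 0, "")  -- unreachable: i is a nonnegative in-range index
    | some c =>
      (String.ofList [c],
       (PySem.Int.ofChars? (PySem.List.slice cs none (some i))).getD 0,  -- int(cigar_str[:i]); Pre_ excludes the ValueError (none) case
       String.ofList (PySem.List.slice cs (some (i + 1)) none))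

-- ===== PRECONDITION & SPEC =====
-- Pre_ excludes exactly the inputs where Python A raises ValueError (int() on the prefix before
-- the first op char when it is not a valid integer literal, e.g. "M5S" or "x3M"); B raises there too.
def Pre_get_head_cigar (cigar_str : String) : Prop :=
  (cigar_str.toList.any (fun c => cigarOps.contains c)) = true →
    (PySem.Int.ofChars? (cigar_str.toList.takeWhile (fun c => !(cigarOps.contains c)))).isSome = true
instance (cigar_str : String) : Decidable (Pre_get_head_cigar cigar_str) := by unfold Pre_get_head_cigar; infer_instance

def pvWitness_get_head_cigar : String := "10M5S"

def Spec_get_head_cigar (cigar_str : String) (out : String × Int × String) : Prop := out = get_head_cigar_alt cigar_str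
instance (cigar_str : String) (out : String × Int × String) : Decidable (Spec_get_head_cigar cigar_str out) := by unfold Spec_get_head_cigar; infer_instance

-- ===== CLAIM (what is proved, stated in full; the proofs are below) =====
def Claim_equal_get_head_cigar : Prop := ∀ (cigar_str : String), Dom_get_head_cigar cigar_str → Pre_get_head_cigar cigar_str → Spec_get_head_cigar cigar_str (get_head_cigar cigar_str)

-- ===== LEMMAS AND PROOFS =====

-- a one-char list is a prefix of l exactly when l starts with that char
theorem singleton_prefix_iff (c : Char) (l : List Char) : [c] <+: l ↔ l[0]? = some c := by
  cases l <;> simp [eq_comm]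

-- A's loop computes the first index of an op char in the traversed suffix
theorem loopA_eq_findIdx? (cs : List Char) (t : List Char) : ∀ (i : Nat),
    getHeadCigarLoopA cs i t =
      match t.findIdx? (fun c => cigarOps.contains c) with
      | none => ("", 0, "")
      | some k =>
        (String.ofList [(t[k]?.getD ' ')],
         (PySem.Int.ofChars? (PySem.List.slice cs (some 0) (some ((i + k : Nat) : Int)))).getD 0,
         if i + k + 1 < cs.length then String.ofList (PySem.List.slice cs (some (((i + k : Nat) : Int) + 1)) none) else "") := by
  induction t with
  | nil => intro i; simp [getHeadCigarLoopA]
  | cons c rest ih =>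
    intro i
    by_cases h : cigarOps.contains c
    · have h' : c ∈ cigarOps := by simpa using h
      simp [getHeadCigarLoopA, List.findIdx?_cons, h']
    · simp only [getHeadCigarLoopA, h, if_false, ih (i + 1), List.findIdx?_cons,
        Bool.false_eq_true, Option.map]
      cases hf : rest.findIdx? (fun c => cigarOps.contains c) with
      | none => simp
      | some k =>
        simp only []
        have : i + 1 + k = i + (k + 1) := by omega
        simp [this]

-- if position q of cs holds char c, then [c] is a prefix of cs.drop q
theorem prefix_drop_of_getElem? (cs : List Char) (q : Nat) (c : Char) (h : cs[q]? = some c) :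
    [c] <+: cs.drop q := by
  rw [singleton_prefix_iff, List.getElem?_drop]
  simpa using h

-- str.find of a single op char returns exactly the findIdx? index of that char's first occurrence,
-- which for the char AT the first op position is that position itself
theorem find_singleton_eq (cs : List Char) (j : Nat) (c0 : Char)
    (hj : cs.findIdx? (fun c => cigarOps.contains c) = some j) (hc0 : cs[j]? = some c0) :
    PySem.Chars.find cs [c0] = (j : Int) := by
  obtain ⟨hjlt, hpj, hmin⟩ := (List.findIdx?_eq_some_iff_getElem).1 hj
  have hc0' : cs[j] = c0 := by
    have := List.getElem?_eq_getElem hjlt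
    rw [this] at hc0; exact Option.some.inj hc0
  have hinfix : [c0] <:+: cs :=
    (prefix_drop_of_getElem? cs j c0 hc0).isInfix.trans (cs.drop_suffix j).isInfix
  have hne : PySem.Chars.find cs [c0] ≠ -1 := (PySem.Chars.find_ne_neg_one_iff _ _).2 hinfix
  have hge : 0 ≤ PySem.Chars.find cs [c0] := by
    have := PySem.Chars.neg_one_le_find cs [c0]; omega
  obtain ⟨hpre, hfmin⟩ := PySem.Chars.find_spec hge
  have hat : cs[(PySem.Chars.find cs [c0]).toNat]? = some c0 := by
    have := (singleton_prefix_iff c0 (cs.drop (PySem.Chars.find cs [c0]).toNat)).1 hpre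
    rwa [List.getElem?_drop, Nat.add_zero] at this
  have hle : (PySem.Chars.find cs [c0]).toNat ≤ j := by
    by_contra hlt
    exact hfmin j (by omega) (prefix_drop_of_getElem? cs j c0 hc0)
  have hgej : j ≤ (PySem.Chars.find cs [c0]).toNat := by
    by_contra hlt
    have hlen : (PySem.Chars.find cs [c0]).toNat < cs.length := by
      by_contra hbig
      rw [List.getElem?_eq_none_iff.2 (by omega)] at hat; simp at hat
    have : cigarOps.contains cs[(PySem.Chars.find cs [c0]).toNat] = true := by
      have : cs[(PySem.Chars.find cs [c0]).toNat] = c0 := by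
        have := List.getElem?_eq_getElem hlen
        rw [this] at hat; exact Option.some.inj hat
      rw [this, ← hc0']; exact hpj
    exact absurd this (by simpa using hmin _ (by omega))
  omega

-- every nonnegative find value points at an op char, hence lies at or after the first op index
theorem mem_positions_ge (cs : List Char) (j : Nat)
    (hj : cs.findIdx? (fun c => cigarOps.contains c) = some j) (q : Int) (c : Char)
    (hc : c ∈ cigarOps) (hq : PySem.Chars.find cs [c] = q) (hq0 : 0 ≤ q) : (j : Int) ≤ q := by
  obtain ⟨hjlt, hpj, hmin⟩ := (List.findIdx?_eq_some_iff_getElem).1 hj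
  subst hq
  obtain ⟨hpre, _⟩ := PySem.Chars.find_spec hq0
  have hat : cs[(PySem.Chars.find cs [c]).toNat]? = some c := by
    have := (singleton_prefix_iff c (cs.drop (PySem.Chars.find cs [c]).toNat)).1 hpre
    rwa [List.getElem?_drop, Nat.add_zero] at this
  by_contra hlt
  have hlen : (PySem.Chars.find cs [c]).toNat < cs.length := by
    by_contra hbig
    rw [List.getElem?_eq_none_iff.2 (by omega)] at hat; simp at hat
  have hco : cigarOps.contains cs[(PySem.Chars.find cs [c]).toNat] = true := by
    have : cs[(PySem.Chars.find cs [c]).toNat] = c := by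
      have := List.getElem?_eq_getElem hlen
      rw [this] at hat; exact Option.some.inj hat
    rw [this]; simpa using hc
  exact absurd hco (by simpa using hmin _ (by omega))

theorem get_head_cigar_spec : Claim_equal_get_head_cigar := by
  intro s _ _
  unfold Spec_get_head_cigar get_head_cigar get_head_cigar_alt
  rw [loopA_eq_findIdx?]
  dsimp only
  cases hf : s.toList.findIdx? (fun c => cigarOps.contains c) with
  | none =>
    have hnone : ∀ c ∈ cigarOps, PySem.Chars.find s.toList [c] = -1 := by
      intro c hc
      rw [PySem.Chars.find_eq_neg_one_iff _ _]
      intro hinf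
      have hmem : c ∈ s.toList := by
        obtain ⟨l₁, l₂, he⟩ := hinf
        simp [← he]
      have := (List.findIdx?_eq_none_iff.1 hf) c hmem
      simp [hc] at this
    have hpos : (cigarOps.map (fun c => PySem.Chars.find s.toList [c])).filter
        (fun p => decide (0 ≤ p)) = [] := by
      rw [List.filter_eq_nil_iff]
      intro q hq
      obtain ⟨c, hc, hrfl⟩ := List.mem_map.1 hq
      simp [← hrfl, hnone c hc]
    simp [hpos, PySem.List.min?]
  | some j =>
    have hjlt : j < s.toList.length := (List.findIdx?_eq_some_iff_getElem.1 hf).1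
    obtain ⟨c0, hc0⟩ : ∃ c0, s.toList[j]? = some c0 := ⟨s.toList[j], List.getElem?_eq_getElem hjlt⟩
    have hc0mem : c0 ∈ cigarOps := by
      have hpj := (List.findIdx?_eq_some_iff_getElem.1 hf).2.1
      have : s.toList[j] = c0 := by
        have := List.getElem?_eq_getElem hjlt
        rw [this] at hc0; exact Option.some.inj hc0
      rw [this] at hpj; simpa using hpj
    set positions := (cigarOps.map (fun c => PySem.Chars.find s.toList [c])).filter
        (fun p => decide (0 ≤ p)) with hposdef
    have hjmem : (j : Int) ∈ positions := by
      rw [hposdef, List.mem_filter]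
      refine ⟨List.mem_map.2 ⟨c0, hc0mem, find_singleton_eq s.toList j c0 hf hc0⟩, by simp⟩
    have hlb : ∀ q ∈ positions, (j : Int) ≤ q := by
      intro q hq
      rw [hposdef, List.mem_filter] at hq
      obtain ⟨c, hc, hrfl⟩ := List.mem_map.1 hq.1
      exact mem_positions_ge s.toList j hf q c hc hrfl (by simpa using hq.2)
    obtain ⟨m, hm⟩ : ∃ m, PySem.List.min? positions (fun p => p) = some m := by
      cases h : PySem.List.min? positions (fun p => p) with
      | none =>
        rw [PySem.List.min?_eq_none_iff] at h
        rw [h] at hjmem; exact absurd hjmem (List.not_mem_nil)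
      | some m => exact ⟨m, rfl⟩
    have hmj : m = (j : Int) := by
      have h1 := hlb m (PySem.List.min?_mem hm)
      have h2 := PySem.List.min?_isMin hm _ hjmem
      omega
    rw [hm, hmj]
    dsimp only
    have hget : PySem.List.pyGet? s.toList ((j : Nat) : Int) = some c0 := by
      rw [PySem.List.pyGet?_natCast]; exact hc0
    rw [hget]
    dsimp only
    have hrest : PySem.List.slice s.toList (some ((j : Int) + 1)) none = s.toList.drop (j + 1) := by
      have h1 : ((j : Int) + 1) = ((j + 1 : Nat) : Int) := by push_cast; ring
      rw [h1, PySem.List.slice_from_natCast]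
    by_cases hlast : j + 1 < s.toList.length
    · simp [hc0, hrest]
    · have hdrop : s.toList.drop (j + 1) = [] := List.drop_eq_nil_of_le (by omega)
      simp [hc0, hrest, hdrop]
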